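-- pv_equiv track=rewrite | github.com/rdancer/brute-lee | compress.py | substring_compress_conservative
-- ===== SOURCE A (Python) =====
-- def substring_compress_conservative(code_book, message):
--     """replaces substrings from message that match a substring in code_book with a compressed representation of the substring in the form <index,length> where index is the index of the substring in code_book and length is the length of the substring in code_book. If the compressed representation is longer than the original substring, the original substring is returned."""
--
--     compressed_message = ''
--     current = ''
--
--     for c in message:
--         current += c
--
--         if current not in code_book:
--             compressed = f"<{code_book.index(current[:-1])},{len(current) - 1}>"
--             if len(current) <= len(compressed):
--                 compressed_message += current.replace('<', '<<')
--             else: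
--                 compressed_message += compressed
--                 compressed_message += c.replace('<', '<<')
--             current = ''
--
--     if len(current) > 0:
--         compressed = f"<{code_book.index(current)},{len(current)}>"
--         if len(current) <= len(compressed):
--             compressed_message += current.replace('<', '<<')
--         else:
--             compressed_message += compressed
--
--     return compressed_message
-- ===== SOURCE B (Python) =====
-- def substring_compress_conservative(code_book, message):
--     """Same compression, but instead of re-scanning code_book with `in` and
--     `.index` for every grown `current`, maintain the list of start positions
--     in code_book where the current run still matches; the first position is
--     the leftmost index, and the run dies exactly when the list empties."""
--     m = len(code_book)
--     full = list(range(m + 1))  # '' matches at every position (incl. m)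
--     parts = []
--     cur = ''
--     occ = full
--     for c in message:
--         k = len(cur)
--         new_occ = [p for p in occ if p + k < m and code_book[p + k] == c]
--         if new_occ:
--             cur += c
--             occ = new_occ
--         else:
--             comp = "<%d,%d>" % (occ[0], k)
--             if k + 1 <= len(comp):
--                 parts.append((cur + c).replace('<', '<<'))
--             else:
--                 parts.append(comp)
--                 parts.append(c.replace('<', '<<'))
--             cur = ''
--             occ = full
--     if cur:
--         comp = "<%d,%d>" % (occ[0], len(cur))
--         parts.append(cur.replace('<', '<<') if len(cur) <= len(comp) else comp)
--     return ''.join(parts)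
-- ===== Notes on version B (the rewrite author's own statement) =====
-- stated objective: alternative
-- what changed: Instead of re-scanning code_book with a substring test (`current in code_book`) for every grown run and a second `.index` scan at each emission, B maintains the list of start positions in code_book where the current run still matches, filtering it by one character per step; the run dies exactly when the list empties and its first element is the leftmost index, so both inner string scans disappear.
import Mathlib
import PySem

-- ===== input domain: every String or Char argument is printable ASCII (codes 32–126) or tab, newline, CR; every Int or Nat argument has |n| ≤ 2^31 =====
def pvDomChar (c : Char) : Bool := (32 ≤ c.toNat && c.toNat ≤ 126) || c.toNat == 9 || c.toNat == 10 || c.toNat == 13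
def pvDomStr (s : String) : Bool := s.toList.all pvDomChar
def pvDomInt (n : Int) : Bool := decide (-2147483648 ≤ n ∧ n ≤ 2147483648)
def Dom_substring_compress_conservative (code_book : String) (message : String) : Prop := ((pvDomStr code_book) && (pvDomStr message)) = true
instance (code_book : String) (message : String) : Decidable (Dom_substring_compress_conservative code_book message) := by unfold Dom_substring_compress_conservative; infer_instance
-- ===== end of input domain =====

-- B replaces A's per-character `current in code_book` rescan and `.index` rescan by a maintained
-- list of start positions of the current run inside code_book (alternative algorithm, same result).

-- ===== PORT A =====
-- loop body of A: state = (compressed_message, current)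
def pvA_step (cb : List Char) (st : List Char × List Char) (c : Char) : List Char × List Char :=
  let cur' := st.2 ++ [c]
  if PySem.Chars.isIn cur' cb then (st.1, cur')
  else
    -- Python's code_book.index(current[:-1]) always succeeds here (current[:-1] passed the
    -- previous membership test or is ''), so it is ported as find (exact at every reached call)
    let compressed : List Char :=
      '<' :: PySem.Int.toChars (PySem.Chars.find cb (PySem.List.slice cur' none (some (-1))))
        ++ ',' :: PySem.Int.toChars (PySem.List.len cur' - 1) ++ ['>']
    if PySem.List.len cur' ≤ PySem.List.len compressed then
      (st.1 ++ PySem.Chars.replace cur' ['<'] ['<', '<'], [])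
    else
      (st.1 ++ compressed ++ PySem.Chars.replace [c] ['<'] ['<', '<'], [])

def substring_compress_conservative (code_book : String) (message : String) : String :=
  let cb := code_book.toList
  let r := message.toList.foldl (pvA_step cb) ([], [])
  String.ofList (if 0 < PySem.List.len r.2 then
    let compressed : List Char :=
      '<' :: PySem.Int.toChars (PySem.Chars.find cb r.2) ++ ',' :: PySem.Int.toChars (PySem.List.len r.2) ++ ['>']
    if PySem.List.len r.2 ≤ PySem.List.len compressed then
      r.1 ++ PySem.Chars.replace r.2 ['<'] ['<', '<']
    else r.1 ++ compressed
  else r.1)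

-- ===== PORT B =====
-- loop body of B: state = (parts, cur, occ); occ = start positions where cur still matches code_book
def pvB_step (cb : List Char) (st : List (List Char) × List Char × List Int) (c : Char) :
    List (List Char) × List Char × List Int :=
  let k : Int := PySem.List.len st.2.1
  let newOcc := st.2.2.filter (fun p =>
    decide (p + k < PySem.List.len cb) && (PySem.List.pyGet? cb (p + k) == some c))
  if newOcc ≠ [] then (st.1, st.2.1 ++ [c], newOcc)
  else
    -- Python's occ[0] never raises here (occ always holds at least one match of cur); ported as pyGetD occ 0 0
    let comp : List Char :=
      '<' :: PySem.Int.toChars (PySem.List.pyGetD st.2.2 0 0) ++ ',' :: PySem.Int.toChars k ++ ['>']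
    if k + 1 ≤ PySem.List.len comp then
      (st.1 ++ [PySem.Chars.replace (st.2.1 ++ [c]) ['<'] ['<', '<']], [],
        PySem.List.pyRange 0 (PySem.List.len cb + 1) 1)
    else
      (st.1 ++ [comp, PySem.Chars.replace [c] ['<'] ['<', '<']], [],
        PySem.List.pyRange 0 (PySem.List.len cb + 1) 1)

def substring_compress_conservative_alt (code_book : String) (message : String) : String :=
  let cb := code_book.toList
  let full := PySem.List.pyRange 0 (PySem.List.len cb + 1) 1
  let r := message.toList.foldl (pvB_step cb) ([], [], full)
  let parts :=
    if r.2.1 ≠ [] then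
      let comp : List Char :=
        '<' :: PySem.Int.toChars (PySem.List.pyGetD r.2.2 0 0) ++ ',' :: PySem.Int.toChars (PySem.List.len r.2.1) ++ ['>']
      r.1 ++ [if PySem.List.len r.2.1 ≤ PySem.List.len comp then PySem.Chars.replace r.2.1 ['<'] ['<', '<'] else comp]
    else r.1
  String.ofList (PySem.Chars.join [] parts)

-- ===== PRECONDITION & SPEC =====
def Spec_substring_compress_conservative (code_book : String) (message : String) (out : String) : Prop := out = substring_compress_conservative_alt code_book message
instance (code_book : String) (message : String) (out : String) : Decidable (Spec_substring_compress_conservative code_book message out) := by unfold Spec_substring_compress_conservative; infer_instance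

-- ===== CLAIM (what is proved, stated in full; the proofs are below) =====
def Claim_equal_substring_compress_conservative : Prop := ∀ (code_book : String) (message : String), Dom_substring_compress_conservative code_book message → Spec_substring_compress_conservative code_book message (substring_compress_conservative code_book message)

-- ===== LEMMAS AND PROOFS =====

-- all start positions (0..|cb|) at which cur matches inside cb
def pvOccN (cb cur : List Char) : List Nat :=
  (List.range (cb.length + 1)).filter (fun p => decide (cur <+: cb.drop p))

-- the simulation invariant between A's state and B's state
def pvInv (cb : List Char) (sa : List Char × List Char) (sb : List (List Char) × List Char × List Int) : Prop :=
  sa.1 = sb.1.flatten ∧ sa.2 = sb.2.1 ∧ sb.2.2 = (pvOccN cb sa.2).map Int.ofNat ∧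
    PySem.Chars.isIn sa.2 cb = true

theorem pv_prefix_snoc (xs : List Char) (c : Char) (l : List Char) :
    (xs ++ [c]) <+: l ↔ xs <+: l ∧ l[xs.length]? = some c := by
  constructor
  · rintro ⟨t, rfl⟩
    refine ⟨⟨[c] ++ t, by simp⟩, ?_⟩
    rw [List.append_assoc, List.getElem?_append_right (le_refl xs.length)]
    simp
  · rintro ⟨⟨r, rfl⟩, hg⟩
    rw [List.getElem?_append_right (le_refl xs.length)] at hg
    simp only [Nat.sub_self] at hg
    cases r with
    | nil => exact absurd hg (by simp)
    | cons a r' =>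
      simp only [List.getElem?_cons_zero, Option.some.injEq] at hg
      subst hg
      exact ⟨r', by simp⟩

theorem pvOccN_nil (cb : List Char) : pvOccN cb [] = List.range (cb.length + 1) := by
  unfold pvOccN
  simp

theorem pvOccN_ne_nil_iff (cb cur : List Char) :
    pvOccN cb cur ≠ [] ↔ PySem.Chars.isIn cur cb = true := by
  rw [← PySem.Chars.exists_prefix_drop_iff_isIn]
  unfold pvOccN
  constructor
  · intro h
    obtain ⟨a, ha⟩ := List.exists_mem_of_ne_nil _ h
    have hpa := (List.mem_filter.mp ha).2
    exact ⟨a, by simpa using hpa⟩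
  · rintro ⟨j, hj⟩
    intro hnil
    have hall := List.filter_eq_nil_iff.mp hnil
    by_cases hle : j ≤ cb.length
    · exact hall j (List.mem_range.mpr (by omega)) (by simpa using hj)
    · have hdrop : cb.drop j = [] := List.drop_eq_nil_of_le (by omega)
      rw [hdrop] at hj
      have hcur : cur = [] := List.prefix_nil.mp hj
      exact hall 0 (List.mem_range.mpr (by omega)) (by simp [hcur])

theorem pv_occ_step_aux (cb cur : List Char) (c : Char) (l : List Nat) :
    ((l.filter (fun p => decide (cur <+: cb.drop p))).map Int.ofNat).filter
        (fun p => decide (p + PySem.List.len cur < PySem.List.len cb) &&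
          (PySem.List.pyGet? cb (p + PySem.List.len cur) == some c)) =
      (l.filter (fun p => decide ((cur ++ [c]) <+: cb.drop p))).map Int.ofNat := by
  induction l with
  | nil => rfl
  | cons a l ih =>
    have hcast : Int.ofNat a + PySem.List.len cur = ((a + cur.length : Nat) : Int) := by
      rw [PySem.List.len_eq]
      simp only [Int.ofNat_eq_natCast]
      omega
    have key : (cur ++ [c]) <+: cb.drop a ↔ (cur <+: cb.drop a ∧ cb[a + cur.length]? = some c) := by
      rw [pv_prefix_snoc, List.getElem?_drop]
    by_cases h2 : cb[a + cur.length]? = some c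
    · have hx : a + cur.length < cb.length := by
        by_contra hge
        rw [List.getElem?_eq_none (by omega)] at h2
        simp at h2
      have hxi : ((a + cur.length : Nat) : Int) < PySem.List.len cb := by
        rw [PySem.List.len_eq]
        omega
      have hpred : (decide (Int.ofNat a + PySem.List.len cur < PySem.List.len cb) &&
          (PySem.List.pyGet? cb (Int.ofNat a + PySem.List.len cur) == some c)) = true := by
        rw [hcast, PySem.List.pyGet?_natCast, h2]
        simp only [beq_self_eq_true, Bool.and_true, decide_eq_true_eq]
        exact hxi
      by_cases h1 : cur <+: cb.drop a
      · rw [List.filter_cons_of_pos (by simpa using h1),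
          List.filter_cons_of_pos (by simp only [decide_eq_true_eq]; exact key.mpr ⟨h1, h2⟩),
          List.map_cons, List.map_cons, List.filter_cons, if_pos hpred, ih]
      · rw [List.filter_cons_of_neg (by simpa using h1),
          List.filter_cons_of_neg (by simp only [decide_eq_true_eq]; exact fun hx' => h1 (key.mp hx').1), ih]
    · have hpred : ¬ ((decide (Int.ofNat a + PySem.List.len cur < PySem.List.len cb) &&
          (PySem.List.pyGet? cb (Int.ofNat a + PySem.List.len cur) == some c)) = true) := by
        rw [hcast, PySem.List.pyGet?_natCast]
        simp [h2]
      by_cases h1 : cur <+: cb.drop a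
      · rw [List.filter_cons_of_pos (by simpa using h1),
          List.filter_cons_of_neg (by simp only [decide_eq_true_eq]; exact fun hx' => h2 (key.mp hx').2),
          List.map_cons, List.filter_cons, if_neg hpred, ih]
      · rw [List.filter_cons_of_neg (by simpa using h1),
          List.filter_cons_of_neg (by simp only [decide_eq_true_eq]; exact fun hx' => h1 (key.mp hx').1), ih]

theorem pvOccN_step (cb cur : List Char) (c : Char) :
    ((pvOccN cb cur).map Int.ofNat).filter (fun p =>
        decide (p + PySem.List.len cur < PySem.List.len cb) &&
          (PySem.List.pyGet? cb (p + PySem.List.len cur) == some c)) =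
      (pvOccN cb (cur ++ [c])).map Int.ofNat := by
  unfold pvOccN
  exact pv_occ_step_aux cb cur c _

theorem pv_filter_range_head (q : Nat → Bool) (n j : Nat) (hj : j < n) (hq : q j = true)
    (hmin : ∀ i, i < j → q i = false) : ∃ t, (List.range n).filter q = j :: t := by
  induction n with
  | zero => omega
  | succ n ih =>
    by_cases hlt : j < n
    · obtain ⟨t, ht⟩ := ih hlt
      refine ⟨t ++ List.filter q [n], ?_⟩
      rw [List.range_succ, List.filter_append, ht]
      simp
    · have hjn : j = n := by omega
      subst hjn
      refine ⟨List.filter q [], ?_⟩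
      rw [List.range_succ, List.filter_append]
      have h0 : (List.range j).filter q = [] := List.filter_eq_nil_iff.mpr (fun a ha => by
        have := hmin a (List.mem_range.mp ha); simp [this])
      rw [h0]
      simp [hq]

theorem pvOccN_head (cb cur : List Char) (h : PySem.Chars.isIn cur cb = true) :
    ∃ t, pvOccN cb cur = (PySem.Chars.find cb cur).toNat :: t := by
  have hin := (PySem.Chars.isIn_iff_infix cur cb).mp h
  have hf0 := (PySem.Chars.find_nonneg_iff cb cur).mpr hin
  obtain ⟨hpre, hmin⟩ := PySem.Chars.find_spec hf0
  have hle := PySem.Chars.find_le_length cb cur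
  exact pv_filter_range_head _ _ _ (by omega) (by simpa using hpre)
    (fun i hi => by simpa using hmin i hi)

theorem pv_head_eq (cb cur : List Char) (h : PySem.Chars.isIn cur cb = true) :
    PySem.List.pyGetD ((pvOccN cb cur).map Int.ofNat) 0 0 = PySem.Chars.find cb cur := by
  obtain ⟨t, ht⟩ := pvOccN_head cb cur h
  have hf0 := (PySem.Chars.find_nonneg_iff cb cur).mpr ((PySem.Chars.isIn_iff_infix cur cb).mp h)
  rw [ht]
  simp only [List.map_cons, PySem.List.pyGetD_zero_cons, Int.ofNat_eq_natCast]
  omega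

theorem pv_full_eq (cb : List Char) :
    PySem.List.pyRange 0 (PySem.List.len cb + 1) 1 = (pvOccN cb []).map Int.ofNat := by
  rw [pvOccN_nil]
  have h : PySem.List.len cb + 1 = ((cb.length + 1 : Nat) : Int) := by
    rw [PySem.List.len_eq]
    push_cast
    ring
  rw [h, PySem.List.pyRange_zero_natCast]
  rfl

theorem pvJoin_nil (ps : List (List Char)) : PySem.Chars.join [] ps = ps.flatten := by
  induction ps with
  | nil => rfl
  | cons a t ih =>
    cases t with
    | nil => simp [PySem.Chars.join_singleton]
    | cons b t' =>
      rw [PySem.Chars.join_cons_cons]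
      simp_all

theorem pv_step_inv (cb : List Char) (sa : List Char × List Char)
    (sb : List (List Char) × List Char × List Int) (c : Char) (h : pvInv cb sa sb) :
    pvInv cb (pvA_step cb sa c) (pvB_step cb sb c) := by
  obtain ⟨oa, cur⟩ := sa
  obtain ⟨pb, cur2, occ⟩ := sb
  unfold pvInv at h ⊢
  dsimp only at h ⊢
  obtain ⟨h1, h2, h3, h4⟩ := h
  subst h1
  subst h2
  subst h3
  unfold pvA_step pvB_step
  dsimp only
  rw [pvOccN_step]
  by_cases hin : PySem.Chars.isIn (cur ++ [c]) cb = true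
  · have hne : (pvOccN cb (cur ++ [c])).map Int.ofNat ≠ [] := by
      simp only [ne_eq, List.map_eq_nil_iff]
      exact (pvOccN_ne_nil_iff cb (cur ++ [c])).mpr hin
    rw [if_pos hin, if_pos hne]
    exact ⟨rfl, rfl, rfl, hin⟩
  · have heq : pvOccN cb (cur ++ [c]) = [] := by
      by_contra hne
      exact hin ((pvOccN_ne_nil_iff cb (cur ++ [c])).mp hne)
    have hBfalse : ¬ ((pvOccN cb (cur ++ [c])).map Int.ofNat ≠ []) := by
      simp [heq]
    rw [if_neg hin, if_neg hBfalse]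
    have hgetd := pv_head_eq cb cur h4
    have hslice : PySem.List.slice (cur ++ [c]) none (some (-1)) = cur := by
      simp [pysem]
    have hlen : PySem.List.len (cur ++ [c]) = PySem.List.len cur + 1 := by
      rw [PySem.List.len_eq, PySem.List.len_eq]
      simp
    rw [hslice, hgetd, hlen]
    have hm1 : PySem.List.len cur + 1 - 1 = PySem.List.len cur := by ring
    rw [hm1]
    split_ifs with hc
    · exact ⟨by simp, rfl, pv_full_eq cb, by simp [PySem.Chars.isIn_nil]⟩
    · exact ⟨by simp, rfl, pv_full_eq cb, by simp [PySem.Chars.isIn_nil]⟩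

theorem pv_foldl_inv (cb : List Char) (ms : List Char) (sa : List Char × List Char)
    (sb : List (List Char) × List Char × List Int) (h : pvInv cb sa sb) :
    pvInv cb (ms.foldl (pvA_step cb) sa) (ms.foldl (pvB_step cb) sb) := by
  induction ms generalizing sa sb with
  | nil => exact h
  | cons c ms ih => exact ih _ _ (pv_step_inv cb sa sb c h)

-- ===== VERDICT (by name: the statement is the Claim_ definition above) =====
theorem substring_compress_conservative_spec : Claim_equal_substring_compress_conservative := by
  unfold Claim_equal_substring_compress_conservative
  intro code_book message _
  unfold Spec_substring_compress_conservative
  unfold substring_compress_conservative substring_compress_conservative_alt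
  dsimp only
  rw [pvJoin_nil]
  obtain ⟨h1, h2, h3, h4⟩ := pv_foldl_inv code_book.toList message.toList ([], [])
    ([], [], PySem.List.pyRange 0 (PySem.List.len code_book.toList + 1) 1)
    ⟨rfl, rfl, pv_full_eq _, by simp [PySem.Chars.isIn_nil]⟩
  by_cases hnil : (message.toList.foldl (pvA_step code_book.toList) ([], [])).2 = []
  · rw [if_neg (by simp [hnil, PySem.List.len_eq]), if_neg (by rw [← h2]; simp [hnil])]
    exact congrArg String.ofList h1
  · have hpos : 0 < PySem.List.len (message.toList.foldl (pvA_step code_book.toList) ([], [])).2 := by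
      rw [PySem.List.len_eq]
      have := List.length_pos_iff.mpr hnil
      exact_mod_cast this
    rw [h3, ← h2, pv_head_eq _ _ h4, h1]
    rw [if_pos hpos, if_pos hnil]
    split_ifs with hc
    · simp
    · simp
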